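-- pv_equiv track=rewrite | github.com/tinusleroux/crowdbiz_graph | app/services/search_service.py | _apply_people_filters
-- ===== SOURCE A (Python) =====
-- from typing import Dict, List, Any, Optional, Tuple
--
-- def _apply_people_filters(people: List[Dict], filters: Dict[str, Any]) -> List[Dict]:
--     """Apply people-specific filters"""
--     filtered_people = people
--
--     # Job title filter
--     if filters.get('job_title'):
--         job_title = filters['job_title'].lower()
--         filtered_people = [
--             person for person in filtered_people
--             if person.get('job_title', '').lower().find(job_title) >= 0
--         ]
--
--     # Organization filter
--     if filters.get('organization'):
--         org_name = filters['organization'].lower()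
--         filtered_people = [
--             person for person in filtered_people
--             if person.get('organization', '').lower().find(org_name) >= 0
--         ]
--
--     # Department filter
--     if filters.get('department'):
--         dept = filters['department'].lower()
--         filtered_people = [
--             person for person in filtered_people
--             if person.get('department', '').lower().find(dept) >= 0
--         ]
--
--     return filtered_people
-- ===== SOURCE B (Python) =====
-- def _apply_people_filters(people, filters):
--     """Apply people-specific filters (single pass over people)."""
--     active = [(key, filters[key].lower())
--               for key in ('job_title', 'organization', 'department')
--               if filters.get(key)]
--     return [person for person in people
--             if all(sub in person.get(key, '').lower() for key, sub in active)]
-- ===== Notes on version B (the rewrite author's own statement) =====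
-- stated objective: simpler
-- what changed: Replaces A's three separate conditional list-comprehension passes over the people list with one pass: the active (key, lowered substring) filters are collected up front and each person is kept iff all active substrings occur in the corresponding lowered field.
import Mathlib
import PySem

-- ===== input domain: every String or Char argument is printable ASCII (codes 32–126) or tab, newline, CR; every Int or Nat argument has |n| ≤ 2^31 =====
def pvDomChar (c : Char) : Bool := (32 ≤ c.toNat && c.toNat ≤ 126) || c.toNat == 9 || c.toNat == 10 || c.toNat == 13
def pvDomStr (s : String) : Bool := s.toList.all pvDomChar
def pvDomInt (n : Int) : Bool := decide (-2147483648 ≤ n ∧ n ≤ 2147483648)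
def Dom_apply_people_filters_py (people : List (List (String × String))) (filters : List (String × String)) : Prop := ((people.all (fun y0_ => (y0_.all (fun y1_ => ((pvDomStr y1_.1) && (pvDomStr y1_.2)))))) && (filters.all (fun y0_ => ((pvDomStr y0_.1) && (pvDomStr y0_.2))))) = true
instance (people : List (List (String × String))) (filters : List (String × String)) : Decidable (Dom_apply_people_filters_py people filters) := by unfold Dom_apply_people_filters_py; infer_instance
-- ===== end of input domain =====

-- B replaces A's three sequential list comprehensions with one pass over `people`
-- against a precomputed list of active (key, lowered-substring) filters (objective: simpler).

-- ===== PORT A =====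
-- person.get(key, '').lower().find(sub) >= 0
def pvAKeep (person : List (String × String)) (key sub : String) : Bool :=
  decide (0 ≤ PySem.Str.find (PySem.Str.lower (PySem.Dict.getD (PySem.Dict.mk person) key "")) sub)

def apply_people_filters_py (people : List (List (String × String))) (filters : List (String × String)) : List (List (String × String)) :=
  let fd := PySem.Dict.mk filters
  let fp0 := people
  -- if filters.get('job_title'):  (truthy = present and non-empty string)
  let fp1 := if fd.getD "job_title" "" ≠ "" then
      fp0.filter (fun person => pvAKeep person "job_title" (PySem.Str.lower (fd.getD "job_title" "")))
    else fp0
  let fp2 := if fd.getD "organization" "" ≠ "" then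
      fp1.filter (fun person => pvAKeep person "organization" (PySem.Str.lower (fd.getD "organization" "")))
    else fp1
  let fp3 := if fd.getD "department" "" ≠ "" then
      fp2.filter (fun person => pvAKeep person "department" (PySem.Str.lower (fd.getD "department" "")))
    else fp2
  fp3

-- ===== PORT B =====
-- sub in person.get(key, '').lower()
def pvBKeep (person : List (String × String)) (kv : String × String) : Bool :=
  PySem.Str.isIn kv.2 (PySem.Str.lower (PySem.Dict.getD (PySem.Dict.mk person) kv.1 ""))

def apply_people_filters_py_alt (people : List (List (String × String))) (filters : List (String × String)) : List (List (String × String)) :=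
  let fd := PySem.Dict.mk filters
  let active := (["job_title", "organization", "department"].filter
      (fun k => fd.getD k "" ≠ "")).map (fun k => (k, PySem.Str.lower (fd.getD k "")))
  people.filter (fun person => active.all (pvBKeep person))

-- ===== PRECONDITION & SPEC =====
def Spec_apply_people_filters_py (people : List (List (String × String))) (filters : List (String × String)) (out : List (List (String × String))) : Prop := out = apply_people_filters_py_alt people filters
instance (people : List (List (String × String))) (filters : List (String × String)) (out : List (List (String × String))) : Decidable (Spec_apply_people_filters_py people filters out) := by unfold Spec_apply_people_filters_py; infer_instance

-- ===== CLAIM (what is proved, stated in full; the proofs are below) =====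
def Claim_equal_apply_people_filters_py : Prop := ∀ (people : List (List (String × String))) (filters : List (String × String)), Dom_apply_people_filters_py people filters → Spec_apply_people_filters_py people filters (apply_people_filters_py people filters)

-- ===== LEMMAS AND PROOFS =====

-- `sub in s` equals `s.find(sub) >= 0` (Python semantics of both membership tests)
theorem pvKeep_eq (person : List (String × String)) (key sub : String) :
    pvBKeep person (key, sub) = pvAKeep person key sub := by
  unfold pvBKeep pvAKeep
  simp only [PySem.Str.isIn_eq, PySem.Str.find_eq]
  by_cases h : sub.toList <:+: (PySem.Str.lower (PySem.Dict.getD (PySem.Dict.mk person) key "")).toList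
  · rw [(PySem.Chars.isIn_iff_infix _ _).2 h]
    exact (decide_eq_true ((PySem.Chars.find_nonneg_iff _ _).2 h)).symm
  · rw [(PySem.Chars.isIn_eq_false_iff _ _).2 h, eq_comm, decide_eq_false]
    intro hc; exact h ((PySem.Chars.find_nonneg_iff _ _).1 hc)

-- ===== VERDICT (by name: the statement is the Claim_ definition above) =====
theorem apply_people_filters_py_spec : Claim_equal_apply_people_filters_py := by
  intro people filters _
  unfold Spec_apply_people_filters_py apply_people_filters_py apply_people_filters_py_alt
  by_cases h1 : PySem.Dict.getD (PySem.Dict.mk filters) "job_title" "" = "" <;>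
  by_cases h2 : PySem.Dict.getD (PySem.Dict.mk filters) "organization" "" = "" <;>
  by_cases h3 : PySem.Dict.getD (PySem.Dict.mk filters) "department" "" = "" <;>
  simp only [h1, h2, h3, ne_eq, not_false_iff, not_true_eq_false,
    ite_true, ite_false, List.filter_cons, List.filter_nil,
    List.map_cons, List.map_nil, List.all_cons, List.all_nil,
    List.filter_filter, Bool.and_true, decide_true, decide_false,
    Bool.false_eq_true, Bool.true_eq_false, List.filter_true] <;>
  · apply List.filter_congr
    intro x _
    simp only [List.all_cons, List.all_nil, pvKeep_eq, Bool.and_true]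
    all_goals cases hA : pvAKeep x "job_title" (PySem.Str.lower (PySem.Dict.getD (PySem.Dict.mk filters) "job_title" "")) <;>
    cases hB : pvAKeep x "organization" (PySem.Str.lower (PySem.Dict.getD (PySem.Dict.mk filters) "organization" "")) <;>
    cases hC : pvAKeep x "department" (PySem.Str.lower (PySem.Dict.getD (PySem.Dict.mk filters) "department" "")) <;>
    simp [hA, hB, hC]
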